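-- pv_equiv track=rewrite | github.com/wuchen0901/algorithm | knapsack/item_count_optimization.py | knapsack_min_items_01
-- ===== SOURCE A (Python) =====
-- from math import inf
-- from typing import Iterable, List
--
-- def _sanitize_weights(weights: Iterable[int], capacity: int) -> List[int]:
--     """Filter out non-positive weights and those exceeding capacity."""
--     if capacity <= 0:
--         return []
--     return [w for w in weights if 1 <= w <= capacity]
--
-- def knapsack_min_items_01(weights: Iterable[int], target: int) -> int:
--     """
--     0-1 knapsack: minimum number of items needed to hit ``target`` exactly.
--     Returns ``-1`` if no combination matches the target weight.
--     """
--     valid = _sanitize_weights(weights, target)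
--     if target == 0:
--         return 0
--     if not valid:
--         return -1
--     dp = [inf] * (target + 1)
--     dp[0] = 0
--     for weight in valid:
--         for total in range(target, weight - 1, -1):
--             if dp[total - weight] != inf:
--                 dp[total] = min(dp[total], dp[total - weight] + 1)
--     return int(dp[target]) if dp[target] != inf else -1
-- ===== SOURCE B (Python) =====
-- from math import inf
--
--
-- def _sanitize_weights(weights, capacity):
--     """Filter out non-positive weights and those exceeding capacity."""
--     if capacity <= 0:
--         return []
--     return [w for w in weights if 1 <= w <= capacity]
--
--
-- def knapsack_min_items_01(weights, target):
--     """
--     0-1 knapsack: minimum number of items needed to hit ``target`` exactly.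
--     Returns ``-1`` if no combination matches the target weight.
--
--     Sparse forward DP: ``counts`` maps each reachable subset sum (<= target)
--     to the minimum number of items producing it.
--     """
--     valid = _sanitize_weights(weights, target)
--     counts = {0: 0}
--     for w in valid:
--         for s, c in list(counts.items()):
--             ns = s + w
--             if ns <= target and c + 1 < counts.get(ns, inf):
--                 counts[ns] = c + 1
--     res = counts.get(target)
--     return res if res is not None else -1
-- ===== Notes on version B (the rewrite author's own statement) =====
-- stated objective: alternative
-- what changed: Replaced A's dense backward dp array of size target+1 (inner loop rescans the whole range target..weight for every item) with a forward sparse dictionary mapping each reachable subset sum to its minimum item count, updated from a snapshot of its items per item.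
import Mathlib
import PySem

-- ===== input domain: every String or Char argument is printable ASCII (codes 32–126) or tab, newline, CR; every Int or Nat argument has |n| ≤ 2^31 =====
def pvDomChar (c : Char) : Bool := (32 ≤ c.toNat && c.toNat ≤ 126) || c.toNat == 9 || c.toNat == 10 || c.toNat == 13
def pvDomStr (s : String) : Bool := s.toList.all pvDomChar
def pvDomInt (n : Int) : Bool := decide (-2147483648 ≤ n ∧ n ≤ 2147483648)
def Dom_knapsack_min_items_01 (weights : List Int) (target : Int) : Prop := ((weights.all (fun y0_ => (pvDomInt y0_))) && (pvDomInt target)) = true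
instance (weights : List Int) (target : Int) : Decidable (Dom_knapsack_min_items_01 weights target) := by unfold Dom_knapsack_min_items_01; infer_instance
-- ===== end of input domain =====

-- B replaces A's dense backward dp array (size target+1, rescanned per item) by a forward sparse
-- dict from each reachable subset sum to its minimum item count: an alternative decomposition.

-- ===== PORT A =====
-- shared helper: _sanitize_weights (textually identical in both Pythons)
def sanitizeWeights (weights : List Int) (capacity : Int) : List Int :=
  if capacity ≤ 0 then [] else weights.filter (fun w => decide (1 ≤ w ∧ w ≤ capacity))

-- min(dp[total], c + 1) where dp[total] may be math.inf (= none)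
def pvMinInf (a : Option Int) (c : Int) : Option Int :=
  match a with
  | none => some c
  | some x => some (min x c)

-- body of A's inner loop: `if dp[total-weight] != inf: dp[total] = min(dp[total], dp[total-weight]+1)`
-- (every index the loop reads or writes lies in [0, target], so getD/setIfInBounds are exact)
def bodyA (w : Int) (dp : Array (Option Int)) (t : Int) : Array (Option Int) :=
  match dp.getD (t - w).toNat none with
  | none => dp
  | some c => dp.setIfInBounds t.toNat (pvMinInf (dp.getD t.toNat none) (c + 1))

-- A's dp list of length target+1, none = math.inf
def knapsack_min_items_01 (weights : List Int) (target : Int) : Int :=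
  let valid := sanitizeWeights weights target
  if target = 0 then 0
  else if valid = [] then -1
  else
    let dp0 := (Array.replicate (target + 1).toNat (none : Option Int)).setIfInBounds 0 (some 0)
    let dp := valid.foldl
      (fun dp w => (PySem.List.pyRange target (w - 1) (-1)).foldl (bodyA w) dp) dp0
    match dp.getD target.toNat none with
    | some n => n
    | none => -1

-- ===== PORT B =====
-- body of B's inner loop over the snapshot list(counts.items()):
-- `ns = s + w; if ns <= target and c + 1 < counts.get(ns, inf): counts[ns] = c + 1`
def bodyB (target w : Int) (cs : PySem.Dict Int Int) (p : Int × Int) : PySem.Dict Int Int :=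
  if decide (p.1 + w ≤ target) &&
      (match cs.get? (p.1 + w) with
       | some v => decide (p.2 + 1 < v)
       | none => true) then
    cs.insert (p.1 + w) (p.2 + 1)
  else cs

def knapsack_min_items_01_alt (weights : List Int) (target : Int) : Int :=
  let valid := sanitizeWeights weights target
  let counts0 : PySem.Dict Int Int := PySem.Dict.mk [(0, 0)]   -- counts = {0: 0}
  let counts := valid.foldl (fun cs w => cs.items.foldl (bodyB target w) cs) counts0
  match counts.get? target with
  | some r => r
  | none => -1

-- ===== PRECONDITION & SPEC =====
def Spec_knapsack_min_items_01 (weights : List Int) (target : Int) (out : Int) : Prop := out = knapsack_min_items_01_alt weights target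
instance (weights : List Int) (target : Int) (out : Int) : Decidable (Spec_knapsack_min_items_01 weights target out) := by unfold Spec_knapsack_min_items_01; infer_instance

-- ===== CLAIM (what is proved, stated in full; the proofs are below) =====
def Claim_equal_knapsack_min_items_01 : Prop := ∀ (weights : List Int) (target : Int), Dom_knapsack_min_items_01 weights target → Spec_knapsack_min_items_01 weights target (knapsack_min_items_01 weights target)

-- ===== LEMMAS AND PROOFS =====

-- proof-side function model of A's dp array (none = math.inf)
def bodyF (w : Int) (dp : Int → Option Int) (t : Int) : Int → Option Int :=
  match dp (t - w) with
  | none => dp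
  | some c => fun t' => if t' = t then pvMinInf (dp t) (c + 1) else dp t'

-- the simultaneous one-item dp step that both loops implement
def stepK (target w : Int) (D : Int → Option Int) : Int → Option Int :=
  fun t =>
    if w ≤ t ∧ t ≤ target then
      match D (t - w) with
      | none => D t
      | some c => pvMinInf (D t) (c + 1)
    else D t

lemma sanitize_mem {weights : List Int} {capacity w : Int}
    (h : w ∈ sanitizeWeights weights capacity) : 1 ≤ w ∧ w ≤ capacity := by
  unfold sanitizeWeights at h
  split at h
  · simp at h
  · simp [List.mem_filter] at h
    exact h.2

-- A's inner (descending-range) loop computes stepK pointwise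
lemma innerA_fold (w : Int) (hw : 1 ≤ w) :
    ∀ (n : Nat) (a : Int), a ≤ w - 1 + n → ∀ (D : Int → Option Int),
      (PySem.List.pyRange a (w - 1) (-1)).foldl (bodyF w) D
        = fun t => if w ≤ t ∧ t ≤ a then
            (match D (t - w) with
             | none => D t
             | some c => pvMinInf (D t) (c + 1))
          else D t := by
  intro n
  induction n with
  | zero =>
    intro a ha D
    rw [PySem.List.pyRange_neg_one_eq_nil (by omega)]
    funext t
    simp only [List.foldl_nil]
    rw [if_neg (by omega)]
  | succ n ih =>
    intro a ha D
    by_cases hle : a ≤ w - 1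
    · rw [PySem.List.pyRange_neg_one_eq_nil hle]
      funext t
      simp only [List.foldl_nil]
      rw [if_neg (by omega)]
    · rw [PySem.List.pyRange_neg_one_cons (by omega)]
      simp only [List.foldl_cons]
      rw [ih (a - 1) (by omega) (bodyF w D a)]
      have hwa : w ≤ a := by omega
      funext t
      cases hDa : D (a - w) with
      | none =>
        have hD1 : bodyF w D a = D := by unfold bodyF; rw [hDa]
        rw [hD1]
        by_cases h2 : t = a
        · rw [h2, if_neg (show ¬(w ≤ a ∧ a ≤ a - 1) by omega),
              if_pos ⟨hwa, le_refl a⟩, hDa]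
        · by_cases h1 : w ≤ t ∧ t ≤ a - 1
          · rw [if_pos h1, if_pos (by omega)]
          · rw [if_neg h1, if_neg (by omega)]
      | some c =>
        have hD1 : bodyF w D a = fun t' => if t' = a then pvMinInf (D a) (c + 1) else D t' := by
          unfold bodyF; rw [hDa]
        rw [hD1]
        simp only []
        by_cases h2 : t = a
        · rw [h2, if_neg (show ¬(w ≤ a ∧ a ≤ a - 1) by omega), if_pos rfl,
              if_pos ⟨hwa, le_refl a⟩, hDa]
        · rw [if_neg h2]
          by_cases h1 : w ≤ t ∧ t ≤ a - 1
          · rw [if_neg (show ¬(t - w = a) by omega), if_pos h1, if_pos (by omega)]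
          · rw [if_neg h1, if_neg (by omega)]

-- B's snapshot loop, characterised over an arbitrary todo list with distinct first components
lemma foldB_get (target w : Int) :
    ∀ (todo : List (Int × Int)) (cur : PySem.Dict Int Int),
      (todo.map Prod.fst).Nodup →
      ∀ t, (todo.foldl (bodyB target w) cur).get? t =
        match todo.find? (fun p => p.1 == t - w) with
        | some p =>
            if decide (t ≤ target) &&
                (match cur.get? t with
                 | some v => decide (p.2 + 1 < v)
                 | none => true) then some (p.2 + 1) else cur.get? t
        | none => cur.get? t := by
  intro todo
  induction todo with
  | nil => intro cur hnd t; simp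
  | cons hd rest ih =>
    intro cur hnd t
    obtain ⟨s, c⟩ := hd
    simp only [List.map_cons, List.nodup_cons] at hnd
    obtain ⟨hs, hndr⟩ := hnd
    simp only [List.foldl_cons, List.find?_cons]
    rw [ih (bodyB target w cur (s, c)) hndr t]
    by_cases hts : t - w = s
    · -- head matches: its insertion (if any) is exactly at key t, invisible to the rest
      have hbeq : ((s, c).1 == t - w) = true := by simp [hts]
      rw [hbeq]
      simp only []
      have hrest : rest.find? (fun p => p.1 == t - w) = none := by
        apply List.find?_eq_none.mpr
        intro p hp
        simp only [beq_iff_eq]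
        intro h
        apply hs
        have : p.1 = s := by omega
        exact this ▸ (List.mem_map_of_mem hp)
      rw [hrest]
      have ht : s + w = t := by omega
      unfold bodyB
      simp only []
      rw [ht]
      by_cases hc : (decide (t ≤ target) &&
          (match cur.get? t with
           | some v => decide (c + 1 < v)
           | none => true)) = true
      · rw [if_pos hc, if_pos hc]
        exact PySem.Dict.get?_insert_self cur t (c + 1)
      · rw [if_neg hc, if_neg hc]
    · -- head does not match: t ≠ s + w, so the head's action is invisible at t
      have hbeq : ((s, c).1 == t - w) = false := by
        simp only [beq_eq_false_iff_ne, ne_eq]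
        omega
      rw [hbeq]
      have hcur1 : (bodyB target w cur (s, c)).get? t = cur.get? t := by
        unfold bodyB
        simp only []
        split <;> split
        all_goals first
          | exact PySem.Dict.get?_insert_of_ne cur (c + 1) (by omega)
          | rfl
      cases hf : rest.find? (fun p => p.1 == t - w) with
      | none => simp only [hcur1]
      | some p => simp only [hcur1]

lemma nodup_keys_foldB (target w : Int) :
    ∀ (todo : List (Int × Int)) (cur : PySem.Dict Int Int),
      cur.keys.Nodup → (todo.foldl (bodyB target w) cur).keys.Nodup := by
  intro todo
  induction todo with
  | nil => intro cur h; simpa using h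
  | cons hd rest ih =>
    intro cur h
    simp only [List.foldl_cons]
    apply ih
    unfold bodyB
    split <;> split
    all_goals first
      | exact PySem.Dict.nodup_keys_insert cur _ _ h
      | exact h

-- one full item step of B equals stepK
lemma stepB_get (target w : Int) (counts : PySem.Dict Int Int)
    (F : Int → Option Int) (hnd : counts.keys.Nodup)
    (hF : ∀ t, counts.get? t = F t) (hneg : ∀ u, u < 0 → F u = none) :
    ∀ t, (counts.items.foldl (bodyB target w) counts).get? t = stepK target w F t := by
  intro t
  have hnd' : (counts.items.map Prod.fst).Nodup := hnd
  rw [foldB_get target w counts.items counts hnd' t]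
  cases hfind : counts.items.find? (fun p => p.1 == t - w) with
  | none =>
    have h2 : F (t - w) = none := by
      rw [← hF]
      simp [PySem.Dict.get?, hfind]
    unfold stepK
    rw [hF t]
    by_cases hr : w ≤ t ∧ t ≤ target
    · rw [if_pos hr, h2]
    · rw [if_neg hr]
  | some p =>
    have hp1 : p.1 = t - w := by
      have := List.find?_some hfind
      simpa [beq_iff_eq] using this
    have hget : F (t - w) = some p.2 := by
      rw [← hF]
      simp [PySem.Dict.get?, hfind]
    have htw : 0 ≤ t - w := by
      by_contra hneg'
      rw [hneg (t - w) (by omega)] at hget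
      simp at hget
    unfold stepK
    by_cases htt : t ≤ target
    · rw [if_pos ⟨by omega, htt⟩, hget]
      rw [hF t]
      cases hFt : F t with
      | none => simp [pvMinInf, htt]
      | some v =>
        by_cases hlt : p.2 + 1 < v
        · simp [pvMinInf, htt, hlt]
          try omega
        · simp [pvMinInf, htt, hlt]
          try omega
    · rw [if_neg (by tauto), hF t]
      simp [htt]

lemma neg_none_step (target w : Int) (hw : 1 ≤ w) (F : Int → Option Int)
    (hneg : ∀ u, u < 0 → F u = none) : ∀ u, u < 0 → stepK target w F u = none := by
  intro u hu
  unfold stepK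
  rw [if_neg (by omega)]
  exact hneg u hu

-- B's outer loop tracks the fold of stepK
lemma outerB (target : Int) :
    ∀ (valid : List Int), (∀ w ∈ valid, 1 ≤ w) →
      ∀ (counts : PySem.Dict Int Int) (F : Int → Option Int),
        counts.keys.Nodup → (∀ t, counts.get? t = F t) → (∀ u, u < 0 → F u = none) →
        ∀ t, (valid.foldl (fun cs w => cs.items.foldl (bodyB target w) cs) counts).get? t
              = valid.foldl (fun D w => stepK target w D) F t := by
  intro valid
  induction valid with
  | nil => intro _ counts F _ hF _ t; simpa using hF t
  | cons w ws ih =>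
    intro hws counts F hnd hF hneg t
    simp only [List.foldl_cons]
    exact ih (fun v hv => hws v (List.mem_cons_of_mem w hv))
      (counts.items.foldl (bodyB target w) counts) (stepK target w F)
      (nodup_keys_foldB target w counts.items counts hnd)
      (stepB_get target w counts F hnd hF hneg)
      (neg_none_step target w (hws w (List.mem_cons_self)) F hneg) t

lemma counts0_get (t : Int) :
    (PySem.Dict.mk [((0 : Int), (0 : Int))]).get? t = if t = 0 then some 0 else none := by
  rw [PySem.Dict.get?_mk_cons]
  by_cases h : t = 0
  · rw [if_pos (by simp [h]), if_pos h]
  · rw [if_neg (by simp; omega), if_neg h]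
    rfl

-- dp array ~ function model relation
def RelAD (target : Int) (dp : Array (Option Int)) (D : Int → Option Int) : Prop :=
  dp.size = (target + 1).toNat ∧ ∀ t : Int, 0 ≤ t → t ≤ target → dp.getD t.toNat none = D t

lemma relAD_body (target w t : Int) (ht : w ≤ t ∧ t ≤ target) (hw : 1 ≤ w)
    {dp : Array (Option Int)} {D : Int → Option Int} (h : RelAD target dp D) :
    RelAD target (bodyA w dp t) (bodyF w D t) := by
  obtain ⟨hsz, hag⟩ := h
  have htw : dp.getD (t - w).toNat none = D (t - w) := hag (t - w) (by omega) (by omega)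
  have htt : dp.getD t.toNat none = D t := hag t (by omega) (by omega)
  unfold bodyA bodyF
  rw [htw]
  cases D (t - w) with
  | none => exact ⟨hsz, hag⟩
  | some c =>
    refine ⟨?_, ?_⟩
    · show (dp.setIfInBounds t.toNat (pvMinInf (dp.getD t.toNat none) (c + 1))).size
          = (target + 1).toNat
      simp [hsz]
    intro u hu0 hut
    show (dp.setIfInBounds t.toNat (pvMinInf (dp.getD t.toNat none) (c + 1))).getD u.toNat none
        = if u = t then pvMinInf (D t) (c + 1) else D u
    by_cases he : u = t
    · rw [he, if_pos rfl, ← htt]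
      have hlt : t.toNat < dp.size := by omega
      simp [Array.getD, hlt]
    · rw [if_neg he]
      have hne : t.toNat ≠ u.toNat := by omega
      rw [Array.getD_eq_getD_getElem?, Array.getElem?_setIfInBounds, if_neg hne,
        ← Array.getD_eq_getD_getElem?]
      exact hag u hu0 hut

lemma relAD_foldInner (target w : Int) (hw : 1 ≤ w) :
    ∀ (ts : List Int), (∀ t ∈ ts, w ≤ t ∧ t ≤ target) →
      ∀ dp D, RelAD target dp D →
        RelAD target (ts.foldl (bodyA w) dp) (ts.foldl (bodyF w) D) := by
  intro ts
  induction ts with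
  | nil => intro _ dp D h; exact h
  | cons t ts ih =>
    intro hmem dp D h
    simp only [List.foldl_cons]
    exact ih (fun u hu => hmem u (List.mem_cons_of_mem t hu)) _ _
      (relAD_body target w t (hmem t List.mem_cons_self) hw h)

lemma relAD_foldOuter (target : Int) :
    ∀ (valid : List Int), (∀ v ∈ valid, 1 ≤ v ∧ v ≤ target) →
      ∀ dp D, RelAD target dp D →
        RelAD target
          (valid.foldl (fun dp w => (PySem.List.pyRange target (w - 1) (-1)).foldl (bodyA w) dp) dp)
          (valid.foldl (fun D w => (PySem.List.pyRange target (w - 1) (-1)).foldl (bodyF w) D) D) := by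
  intro valid
  induction valid with
  | nil => intro _ dp D h; exact h
  | cons w ws ih =>
    intro hmem dp D h
    simp only [List.foldl_cons]
    refine ih (fun v hv => hmem v (List.mem_cons_of_mem w hv)) _ _ ?_
    obtain ⟨hw1, hw2⟩ := hmem w List.mem_cons_self
    refine relAD_foldInner target w hw1 _ ?_ dp D h
    intro t htm
    have := (PySem.List.mem_pyRange_neg_one).mp htm
    omega

lemma relAD_init (target : Int) (h1 : 1 ≤ target) :
    RelAD target ((Array.replicate (target + 1).toNat (none : Option Int)).setIfInBounds 0 (some 0))
      (fun t => if t = 0 then some 0 else none) := by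
  refine ⟨by simp, ?_⟩
  intro t ht0 htt
  show ((Array.replicate (target + 1).toNat (none : Option Int)).setIfInBounds 0 (some 0)).getD
      t.toNat none = if t = 0 then some 0 else none
  by_cases he : t = 0
  · rw [he, if_pos rfl]
    simp [Array.getD]
    omega
  · rw [if_neg he]
    have hne : (0 : Nat) ≠ t.toNat := by omega
    rw [Array.getD_eq_getD_getElem?, Array.getElem?_setIfInBounds, if_neg hne,
      ← Array.getD_eq_getD_getElem?]
    have hlt : t.toNat < (target + 1).toNat := by omega
    simp [Array.getD, hlt]

-- ===== VERDICT (by name: the statement is the Claim_ definition above) =====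
theorem knapsack_min_items_01_spec : Claim_equal_knapsack_min_items_01 := by
  intro weights target _
  unfold Spec_knapsack_min_items_01
  simp only [knapsack_min_items_01, knapsack_min_items_01_alt]
  by_cases h0 : target = 0
  · subst h0
    rw [if_pos rfl]
    have hs : sanitizeWeights weights 0 = [] := by unfold sanitizeWeights; rw [if_pos le_rfl]
    rw [hs]
    simp only [List.foldl_nil]
    rw [counts0_get 0, if_pos rfl]
  · rw [if_neg h0]
    by_cases hv : sanitizeWeights weights target = []
    · rw [if_pos hv, hv]
      simp only [List.foldl_nil]
      rw [counts0_get target, if_neg h0]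
    · rw [if_neg hv]
      have hmem : ∀ w ∈ sanitizeWeights weights target, 1 ≤ w ∧ w ≤ target := by
        intro w hw; exact sanitize_mem hw
      have h1 : 1 ≤ target := by
        obtain ⟨w, hw⟩ := List.exists_mem_of_ne_nil _ hv
        have := hmem w hw
        omega
      -- A's dp array tracks the function model
      have hrel := relAD_foldOuter target (sanitizeWeights weights target) hmem
        ((Array.replicate (target + 1).toNat (none : Option Int)).setIfInBounds 0 (some 0))
        (fun t => if t = 0 then some 0 else none) (relAD_init target h1)
      rw [hrel.2 target (by omega) le_rfl]
      -- A's fold equals the fold of stepK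
      have hA : (sanitizeWeights weights target).foldl
          (fun dp w => (PySem.List.pyRange target (w - 1) (-1)).foldl (bodyF w) dp)
          (fun t => if t = 0 then some 0 else none)
          = (sanitizeWeights weights target).foldl (fun D w => stepK target w D)
            (fun t => if t = 0 then some 0 else none) := by
        apply PySem.List.foldl_congr_mem
        intro D w hw
        obtain ⟨hw1, hw2⟩ := hmem w hw
        exact innerA_fold w hw1 ((target - (w - 1)).toNat) target (by omega) D
      rw [hA]
      -- B's fold equals the same fold of stepK, read through get?
      rw [outerB target (sanitizeWeights weights target) (fun w hw => (hmem w hw).1)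
        (PySem.Dict.mk [(0, 0)]) (fun t => if t = 0 then some 0 else none)
        (by simp [PySem.Dict.keys]) counts0_get
        (fun u hu => by simp [show ¬(u = 0) by omega]) target]
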